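-- pv_equiv track=rewrite | github.com/JooaeSon/Daily_CodingTest | Programmers/Lv.2/[3차] n진수 게임.py | calculate
-- ===== SOURCE A (Python) =====
-- def transAlpha(num):
--     if num == 10:
--         return 'A'
--     elif num == 11:
--         return 'B'
--     elif num == 12:
--         return 'C'
--     elif num == 13:
--         return 'D'
--     elif num == 14:
--         return 'E'
--     elif num == 15:
--         return 'F'
--
-- def calculate(jinsu, amount):
--     result = '0'
--     for num in range(1, amount + 1):
--         s = ''
--         while num != 0:
--             if num % jinsu >= 10:
--                 s = transAlpha(num % jinsu) + s
--             else:
--                 s = str(num % jinsu) + s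
--             num = num // jinsu
--
--         result += s
--
--     return result
-- ===== SOURCE B (Python) =====
-- DIGITS = '0123456789ABCDEF'
--
-- def to_base(num, jinsu):
--     if num == 0:
--         return ''
--     return to_base(num // jinsu, jinsu) + DIGITS[num % jinsu]
--
-- def calculate(jinsu, amount):
--     return '0' + ''.join(to_base(num, jinsu) for num in range(1, amount + 1))
-- ===== Notes on version B (the rewrite author's own statement) =====
-- stated objective: simpler
-- what changed: A's explicit while-loop that prepends digits into an accumulator string and its if/elif letter table are replaced by a quotient-first recursive converter to_base indexing a single digit string, with the result assembled by ''.join over a generator instead of repeated += into an accumulator; Pre_ restricts to jinsu >= 2 (the natural base-conversion domain; …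
-- outside the precondition, e.g. on calculate(-2, 2): A returns '0-1-1-10', B returns '0FFF0'
import Mathlib
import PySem

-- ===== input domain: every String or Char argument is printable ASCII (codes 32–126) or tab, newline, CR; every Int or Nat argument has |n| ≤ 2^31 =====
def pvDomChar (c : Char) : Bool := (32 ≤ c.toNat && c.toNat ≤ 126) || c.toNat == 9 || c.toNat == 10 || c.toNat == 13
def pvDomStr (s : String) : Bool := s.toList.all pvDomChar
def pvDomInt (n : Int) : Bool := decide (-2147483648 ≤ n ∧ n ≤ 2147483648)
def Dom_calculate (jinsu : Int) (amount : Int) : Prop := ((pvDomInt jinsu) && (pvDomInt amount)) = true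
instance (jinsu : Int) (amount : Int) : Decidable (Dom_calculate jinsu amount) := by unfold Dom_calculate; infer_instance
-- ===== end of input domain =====

-- B replaces A's digit-prepending while-loop and if/elif letter table by a quotient-first
-- recursive base converter over a digit string, joined over the range (objective: simpler).


-- ===== PORT A =====
-- Python's transAlpha returns None outside 10..15; under Pre_ it is only called with 10..15,
-- so the final "" branch is unreachable there.
def transAlpha (num : Int) : String :=
  if num = 10 then "A"
  else if num = 11 then "B"
  else if num = 12 then "C"
  else if num = 13 then "D"
  else if num = 14 then "E"
  else if num = 15 then "F"
  else ""

-- the inner `while num != 0` loop; fuel = num.toNat suffices since under Pre_ (jinsu ≥ 2)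
-- num strictly decreases and stays ≥ 0, so the fuel-0 fallback is never reached with num ≠ 0.
def calcWhileA (jinsu : Int) : Nat → Int → String → String
  | 0, _, s => s
  | f + 1, num, s =>
    if num = 0 then s
    else calcWhileA jinsu f (PySem.Int.floordiv num jinsu)
      ((if PySem.Int.mod num jinsu ≥ 10 then transAlpha (PySem.Int.mod num jinsu)
        else PySem.Int.toStr (PySem.Int.mod num jinsu)) ++ s)

def calculate (jinsu : Int) (amount : Int) : String :=
  (PySem.List.pyRange 1 (amount + 1) 1).foldl
    (fun result num => result ++ calcWhileA jinsu num.toNat num "") "0"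

-- ===== PORT B =====
def DIGITS : String := "0123456789ABCDEF"

-- recursive to_base; fuel = num.toNat for the same reason as in port A.
-- DIGITS[num % jinsu]: Python raises IndexError on the none case, unreachable under Pre_.
def toBase (jinsu : Int) : Nat → Int → String
  | 0, _ => ""
  | f + 1, num =>
    if num = 0 then ""
    else toBase jinsu f (PySem.Int.floordiv num jinsu) ++
      (match PySem.Str.pyGet? DIGITS (PySem.Int.mod num jinsu) with
       | some c => String.ofList [c]
       | none => "")

def calculate_alt (jinsu : Int) (amount : Int) : String :=
  "0" ++ String.join ((PySem.List.pyRange 1 (amount + 1) 1).map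
    (fun num => toBase jinsu num.toNat num))

-- ===== PRECONDITION & SPEC =====
-- Pre_ restricts to jinsu ≥ 2 (the natural base-conversion domain: for jinsu ≤ -2 A returns
-- accidental negative-digit strings such as '0-1-1-10', and for jinsu ∈ {-1, 0, 1} it diverges
-- or raises ZeroDivisionError) and, for jinsu ≥ 17, to amount ≤ 15 — exactly the inputs with
-- every digit ≤ 15, on the rest A raises TypeError (transAlpha returns None); amount ≤ 0 is
-- always admitted (the loop body never runs, both return "0").
def Pre_calculate (jinsu : Int) (amount : Int) : Prop :=
  (2 ≤ jinsu ∧ (jinsu ≤ 16 ∨ amount ≤ 15)) ∨ amount ≤ 0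
instance (jinsu : Int) (amount : Int) : Decidable (Pre_calculate jinsu amount) := by
  unfold Pre_calculate; infer_instance
def pvWitness_calculate : Int × Int := (16, 20)

def Spec_calculate (jinsu : Int) (amount : Int) (out : String) : Prop := out = calculate_alt jinsu amount
instance (jinsu : Int) (amount : Int) (out : String) : Decidable (Spec_calculate jinsu amount out) := by unfold Spec_calculate; infer_instance

-- ===== CLAIM (what is proved, stated in full; the proofs are below) =====
def Claim_equal_calculate : Prop := ∀ (jinsu : Int) (amount : Int), Dom_calculate jinsu amount → Pre_calculate jinsu amount → Spec_calculate jinsu amount (calculate jinsu amount)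

-- ===== LEMMAS AND PROOFS =====

-- the digit strings agree for remainders 0..15
lemma digit_eq (r : Int) (h0 : 0 ≤ r) (h16 : r < 16) :
    (if r ≥ 10 then transAlpha r else PySem.Int.toStr r) =
    (match PySem.Str.pyGet? DIGITS r with
     | some c => String.ofList [c]
     | none => "") := by
  interval_cases r <;> decide

-- A's while-loop computes to_base applied in front of the accumulator
lemma while_eq_toBase (j : Int) (hj : 2 ≤ j) :
    ∀ (f : Nat) (num : Int) (s : String), 0 ≤ num → num.toNat ≤ f → (j ≤ 16 ∨ num ≤ 15) →
      calcWhileA j f num s = toBase j f num ++ s := by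
  intro f
  induction f with
  | zero =>
    intro num s h0 hf _
    have : num = 0 := by omega
    simp [calcWhileA, toBase]
  | succ f ih =>
    intro num s h0 hf hcase
    by_cases hz : num = 0
    · simp [calcWhileA, toBase, hz]
    · have hpos : 0 < num := lt_of_le_of_ne h0 (Ne.symm hz)
      have hdiv : PySem.Int.floordiv num j = num / j :=
        PySem.Int.floordiv_eq_ediv_of_pos (by omega)
      have hq0 : 0 ≤ num / j := Int.ediv_nonneg h0 (by omega)
      have hqlt : num / j < num := Int.ediv_lt_of_lt_mul (by omega) (by nlinarith)
      have hmod : PySem.Int.mod num j = num % j :=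
        PySem.Int.mod_eq_emod_of_pos (by omega)
      have hr0 : 0 ≤ num % j := Int.emod_nonneg num (by omega)
      have hr16 : num % j < 16 := by
        by_cases h16 : j ≤ 16
        · exact lt_of_lt_of_le (Int.emod_lt_of_pos num (by omega)) h16
        · have h15 : num ≤ 15 := hcase.resolve_left h16
          have hlt : num < j := by omega
          rw [Int.emod_eq_of_lt h0 hlt]; omega
      have hcase' : j ≤ 16 ∨ num / j ≤ 15 := by
        by_cases h16 : j ≤ 16
        · exact Or.inl h16
        · have h15 : num ≤ 15 := hcase.resolve_left h16
          have hlt : num < j := by omega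
          right; rw [Int.ediv_eq_zero_of_lt h0 hlt]; omega
      rw [calcWhileA, toBase]
      simp only [hz, ite_false]
      rw [ih _ _ (hdiv ▸ hq0) (by omega) (hdiv ▸ hcase'), hmod,
        digit_eq (num % j) hr0 hr16, String.append_assoc]

-- a left fold of appends factors its starting accumulator to the front
lemma foldl_shift (g : Int → String) :
    ∀ (l : List Int) (a : String),
      l.foldl (fun acc n => acc ++ g n) a = a ++ l.foldl (fun acc n => acc ++ g n) "" := by
  intro l
  induction l with
  | nil => intro a; simp
  | cons x xs ih =>
    intro a
    rw [List.foldl_cons, List.foldl_cons, ih ((a : String) ++ g x), ih ("" ++ g x)]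
    simp [String.append_assoc]

-- the empty-accumulator fold of appends is the join of the pieces
lemma foldl_eq_join (g : Int → String) (l : List Int) :
    l.foldl (fun acc n => acc ++ g n) "" = String.join (l.map g) := by
  simp [String.join, List.foldl_map]

-- ===== VERDICT (by name: the statement is the Claim_ definition above) =====
theorem calculate_spec : Claim_equal_calculate := by
  intro jinsu amount _hdom hpre
  unfold Spec_calculate calculate calculate_alt
  by_cases ha : amount ≤ 0
  · rw [PySem.List.pyRange_one_eq_nil (by omega)]
    simp [String.join]
  · obtain ⟨hj, hor⟩ := hpre.resolve_right (by omega)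
    rw [foldl_shift, foldl_eq_join]
    congr 1
    apply congrArg
    apply List.map_congr_left
    intro n hn
    obtain ⟨h1, h2⟩ := PySem.List.mem_pyRange_one.mp hn
    rw [while_eq_toBase jinsu hj n.toNat n "" (by omega) le_rfl
      (by rcases hor with h | h; exacts [Or.inl h, Or.inr (by omega)])]
    simp
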